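-- pv_equiv track=rewrite | github.com/Luckey-Elijah/Fall-2020 | Computer-Security-FA-2020-CIS-4367-01/Long-Assignment-01/vigenere_cipher.py | encrypt_letter
-- ===== SOURCE A (Python) =====
-- def encrypt_letter(char, key):
--     '''
--     E = (P + K) mod 26
--     '''
--     # TODO: use all characters
--     p = ord(char)
--     k = ord(key)
--     e = (p + k) % 26
--
--     # TODO: Test evaluations
--     while e < 65:
--         e = e + 26
--     while e > 122:
--         e = e - 26
--     enc_char = chr(e)
--     return enc_char
-- ===== SOURCE B (Python) =====
-- def encrypt_letter(char, key):
--     # closed form: same value as (P+K) mod 26 normalized into the uppercase band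
--     return chr((ord(char) + ord(key) - 65) % 26 + 65)
-- ===== Notes on version B (the rewrite author's own statement) =====
-- stated objective: simpler
-- what changed: Replaces the %26 plus two normalization while-loops by a single closed-form modular expression ((ord(char)+ord(key)-65)%26+65).
import Mathlib
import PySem

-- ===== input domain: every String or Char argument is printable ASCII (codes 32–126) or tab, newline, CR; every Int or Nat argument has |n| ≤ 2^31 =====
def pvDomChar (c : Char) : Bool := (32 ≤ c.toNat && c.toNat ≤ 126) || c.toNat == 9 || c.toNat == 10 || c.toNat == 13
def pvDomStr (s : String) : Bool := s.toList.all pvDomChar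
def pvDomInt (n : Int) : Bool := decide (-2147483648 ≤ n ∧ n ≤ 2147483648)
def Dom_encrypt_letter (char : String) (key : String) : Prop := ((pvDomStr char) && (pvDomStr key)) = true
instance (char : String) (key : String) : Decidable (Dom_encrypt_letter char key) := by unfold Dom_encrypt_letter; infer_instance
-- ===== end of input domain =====

-- B replaces A's %26 plus two normalization while-loops by one closed-form modular expression; equal on all one-char inputs.

-- ===== PORT A =====
-- 'while e < 65: e = e + 26' (terminates: e strictly increases toward 65)
def pvWhileUp (e : Int) : Int :=
  if e < 65 then pvWhileUp (e + 26) else e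
termination_by (65 - e).toNat
decreasing_by omega

-- 'while e > 122: e = e - 26'
def pvWhileDown (e : Int) : Int :=
  if e > 122 then pvWhileDown (e - 26) else e
termination_by (e - 122).toNat
decreasing_by omega

-- ord raises TypeError unless the string has length 1 (excluded by Pre_);
-- chr(e) is Char.ofNat e.toNat, exact here since e always lands in [65,90].
def encrypt_letter (char : String) (key : String) : String :=
  match char.toList, key.toList with
  | [c], [k] =>
    let p : Int := c.toNat
    let k' : Int := k.toNat
    let e := PySem.Int.mod (p + k') 26
    let e := pvWhileUp e
    let e := pvWhileDown e
    String.ofList [Char.ofNat e.toNat]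
  | _, _ => ""

-- ===== PORT B =====
-- ord ported as a length guard + head (the headD default is unreachable under the guard)
def encrypt_letter_alt (char : String) (key : String) : String :=
  if char.toList.length == 1 && key.toList.length == 1 then
    let c := char.toList.headD ' '
    let k := key.toList.headD ' '
    let e := PySem.Int.mod ((c.toNat : Int) + (k.toNat : Int) - 65) 26 + 65
    String.ofList [Char.ofNat e.toNat]
  else ""

-- ===== PRECONDITION & SPEC =====
-- Pre_: ord requires one-character strings; Python raises TypeError otherwise.
def Pre_encrypt_letter (char : String) (key : String) : Prop :=
  char.toList.length = 1 ∧ key.toList.length = 1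
instance (char : String) (key : String) : Decidable (Pre_encrypt_letter char key) := by
  unfold Pre_encrypt_letter; infer_instance

def pvWitness_encrypt_letter : String × String := ("A", "B")

def Spec_encrypt_letter (char : String) (key : String) (out : String) : Prop := out = encrypt_letter_alt char key
instance (char : String) (key : String) (out : String) : Decidable (Spec_encrypt_letter char key out) := by unfold Spec_encrypt_letter; infer_instance

-- ===== CLAIM (what is proved, stated in full; the proofs are below) =====
def Claim_equal_encrypt_letter : Prop := ∀ (char : String) (key : String), Dom_encrypt_letter char key → Pre_encrypt_letter char key → Spec_encrypt_letter char key (encrypt_letter char key)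

-- ===== LEMMAS AND PROOFS =====
lemma pvWhileUp_small {m : Int} (h0 : 0 ≤ m) (h1 : m < 26) :
    pvWhileUp m = (m - 65) % 26 + 65 := by
  rw [pvWhileUp, if_pos (by omega), pvWhileUp, if_pos (by omega), pvWhileUp]
  by_cases h : m + 26 + 26 < 65
  · rw [if_pos h, pvWhileUp, if_neg (by omega)]
    omega
  · rw [if_neg h]
    omega

lemma pvWhileDown_id {e : Int} (h : e ≤ 122) : pvWhileDown e = e := by
  rw [pvWhileDown, if_neg (by omega)]

theorem encrypt_letter_spec : Claim_equal_encrypt_letter := by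
  intro char key _ hpre
  obtain ⟨hc, hk⟩ := hpre
  obtain ⟨c, hcl⟩ := List.length_eq_one_iff.mp hc
  obtain ⟨k, hkl⟩ := List.length_eq_one_iff.mp hk
  unfold Spec_encrypt_letter encrypt_letter encrypt_letter_alt
  rw [hcl, hkl]
  simp only [List.length_cons, List.length_nil, List.headD]
  norm_num
  have h26 : (0:Int) < 26 := by omega
  have hm0 : (0:Int) ≤ ((c.toNat : Int) + (k.toNat : Int)) % 26 := Int.emod_nonneg _ (by omega)
  have hm1 : ((c.toNat : Int) + (k.toNat : Int)) % 26 < 26 := Int.emod_lt_of_pos _ h26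
  rw [pvWhileUp_small hm0 hm1]
  have hb : (((c.toNat : Int) + (k.toNat : Int)) % 26 - 65) % 26 + 65 ≤ 122 := by
    have := Int.emod_nonneg (((c.toNat : Int) + (k.toNat : Int)) % 26 - 65) (show (26:Int) ≠ 0 by omega)
    have := Int.emod_lt_of_pos (((c.toNat : Int) + (k.toNat : Int)) % 26 - 65) h26
    omega
  rw [pvWhileDown_id hb]
  congr 2
  conv_lhs => rw [Int.sub_emod, Int.emod_emod_of_dvd _ dvd_rfl, ← Int.sub_emod]
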